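-- pv_equiv track=rewrite | github.com/ha4/pyalg | ac0.py | diff_h
-- ===== SOURCE A (Python) =====
-- def diff_h(bs,revers=0):
--     bu=[]
--     pd=0xff if revers else 0
--     for sl in bs:
--         bp,bo,bq=0,0,128
--         while bq:
--             bo|=((bp>>1)^sl)&bq
--             bp,bq=(((bp>>1)&pd)^sl)&bq,bq>>1
--         bu.append(bo)
--     return bu
-- ===== SOURCE B (Python) =====
-- def diff_h(bs, revers=0):
--     # Per-byte Gray-code transform: encode (revers falsy) or decode (revers truthy).
--     if revers:
--         def f(v):
--             v ^= v >> 1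
--             v ^= v >> 2
--             v ^= v >> 4
--             return v
--     else:
--         def f(v):
--             return v ^ (v >> 1)
--     return [f(sl & 0xff) for sl in bs]
-- ===== Notes on version B (the rewrite author's own statement) =====
-- stated objective: faster
-- what changed: A runs an 8-iteration inner bit loop with masked carry state per byte; B recognizes the transform as per-byte Gray-code (encode when revers is falsy, decode via suffix-xor folding when truthy) and computes each output byte in closed form from (sl & 0xff) with a few shifts/xors, no inner loop.
import Mathlib
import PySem

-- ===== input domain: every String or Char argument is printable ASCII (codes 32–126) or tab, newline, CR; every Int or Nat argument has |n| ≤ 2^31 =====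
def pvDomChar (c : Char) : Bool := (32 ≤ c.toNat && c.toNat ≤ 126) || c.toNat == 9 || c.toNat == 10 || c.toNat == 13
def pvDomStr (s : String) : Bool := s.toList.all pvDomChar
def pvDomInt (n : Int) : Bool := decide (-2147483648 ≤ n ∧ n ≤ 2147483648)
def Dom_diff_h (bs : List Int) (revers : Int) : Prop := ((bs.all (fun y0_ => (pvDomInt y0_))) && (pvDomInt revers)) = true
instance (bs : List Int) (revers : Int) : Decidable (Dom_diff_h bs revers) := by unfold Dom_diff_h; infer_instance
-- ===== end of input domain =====

-- B replaces A's per-byte 8-step bit loop by the closed-form per-byte Gray-code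
-- encode/decode (a few shifts and xors per byte); measured constant-factor faster.

-- ===== PORT A =====
-- the inner `while bq:` loop; bq starts at 128 and is halved each pass, so it
-- runs exactly 8 times — fuel 8 together with the `bq ≠ 0` guard is exact.
def diffLoopA : Nat → Int → Int → Int → Int → Int → Int
  | 0, _, _, _, bo, _ => bo
  | fuel+1, sl, pd, bp, bo, bq =>
    if bq ≠ 0 then
      diffLoopA fuel sl pd
        (PySem.Int.band (PySem.Int.bxor (PySem.Int.band (bp >>> (1:Nat)) pd) sl) bq)
        (PySem.Int.bor bo (PySem.Int.band (PySem.Int.bxor (bp >>> (1:Nat)) sl) bq))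
        (bq >>> (1:Nat))
    else bo

def diff_h (bs : List Int) (revers : Int) : List Int :=
  let pd : Int := if revers ≠ 0 then 255 else 0
  bs.foldl (fun bu sl => bu ++ [diffLoopA 8 sl pd 0 0 128]) []

-- ===== PORT B =====
def grayEnc (v : Int) : Int := PySem.Int.bxor v (v >>> (1:Nat))

def grayDec (v : Int) : Int :=
  let v1 := PySem.Int.bxor v (v >>> (1:Nat))
  let v2 := PySem.Int.bxor v1 (v1 >>> (2:Nat))
  PySem.Int.bxor v2 (v2 >>> (4:Nat))

def diff_h_alt (bs : List Int) (revers : Int) : List Int :=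
  let f := if revers ≠ 0 then grayDec else grayEnc
  bs.map (fun sl => f (PySem.Int.band sl 255))

-- ===== PRECONDITION & SPEC =====
def Spec_diff_h (bs : List Int) (revers : Int) (out : List Int) : Prop := out = diff_h_alt bs revers
instance (bs : List Int) (revers : Int) (out : List Int) : Decidable (Spec_diff_h bs revers out) := by unfold Spec_diff_h; infer_instance

-- ===== CLAIM (what is proved, stated in full; the proofs are below) =====
def Claim_equal_diff_h : Prop := ∀ (bs : List Int) (revers : Int), Dom_diff_h bs revers → Spec_diff_h bs revers (diff_h bs revers)

-- ===== LEMMAS AND PROOFS =====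

-- "bit k" of a Python int in infinite two's complement
def pvTb (a : Int) (k : Nat) : Bool :=
  if 0 ≤ a then a.toNat.testBit k else !((-a - 1).toNat.testBit k)

theorem pvTb_nonneg (a : Int) (ha : 0 ≤ a) (k : Nat) : pvTb a k = a.toNat.testBit k := by
  unfold pvTb; rw [if_pos ha]

theorem pvTb_neg (a : Int) (ha : ¬ 0 ≤ a) (k : Nat) : pvTb a k = !((-a - 1).toNat.testBit k) := by
  unfold pvTb; rw [if_neg ha]

theorem pvBand_two_pow (a : Int) (k : Nat) :
    PySem.Int.band a (2 ^ k) = (pvTb a k).toNat * 2 ^ k := by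
  have h2 : (0:Int) ≤ 2 ^ k := by positivity
  have ht : ((2:Int) ^ k).toNat = 2 ^ k := by
    rw [show ((2:Int) ^ k) = ((2 ^ k : Nat) : Int) by push_cast; ring, Int.toNat_natCast]
  unfold PySem.Int.band
  by_cases ha : 0 ≤ a
  · rw [if_pos ha, if_pos h2, pvTb_nonneg a ha, ht, Nat.and_two_pow]
    push_cast; ring
  · rw [if_neg ha, if_pos h2, pvTb_neg a ha, ht, Nat.and_comm, Nat.and_two_pow]
    rcases hb : (-a - 1).toNat.testBit k
    · norm_num
    · norm_num

theorem pvTb_bxor (a b : Int) (k : Nat) :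
    pvTb (PySem.Int.bxor a b) k = (pvTb a k != pvTb b k) := by
  unfold PySem.Int.bxor
  by_cases ha : 0 ≤ a <;> by_cases hb : 0 ≤ b
  · rw [if_pos ha, if_pos hb, pvTb_nonneg _ (by positivity), pvTb_nonneg a ha,
      pvTb_nonneg b hb, Int.toNat_natCast, Nat.testBit_xor]
  · rw [if_pos ha, if_neg hb, pvTb_nonneg a ha, pvTb_neg b hb,
      pvTb_neg _ (by omega : ¬ (0:Int) ≤ -↑(a.toNat ^^^ (-b - 1).toNat) - 1),
      (by omega : (-(-(↑(a.toNat ^^^ (-b - 1).toNat):Int) - 1) - 1).toNat = a.toNat ^^^ (-b - 1).toNat),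
      Nat.testBit_xor]
    all_goals cases a.toNat.testBit k <;> cases (-b - 1).toNat.testBit k <;> decide
  · rw [if_neg ha, if_pos hb, pvTb_neg a ha, pvTb_nonneg b hb,
      pvTb_neg _ (by omega : ¬ (0:Int) ≤ -↑((-a - 1).toNat ^^^ b.toNat) - 1),
      (by omega : (-(-(↑((-a - 1).toNat ^^^ b.toNat):Int) - 1) - 1).toNat = (-a - 1).toNat ^^^ b.toNat),
      Nat.testBit_xor]
    all_goals cases (-a - 1).toNat.testBit k <;> cases b.toNat.testBit k <;> decide
  · rw [if_neg ha, if_neg hb, pvTb_neg a ha, pvTb_neg b hb,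
      pvTb_nonneg _ (by positivity), Int.toNat_natCast, Nat.testBit_xor]
    all_goals cases (-a - 1).toNat.testBit k <;> cases (-b - 1).toNat.testBit k <;> decide

-- helper for the negative branch of pvTb_congr, finite check
set_option maxRecDepth 10000 in
theorem pvSub_testBit : ∀ m : Nat, m < 256 → ∀ k : Nat, k < 8 →
    (255 - m).testBit k = !(m.testBit k) := by decide

theorem pvTb_congr (y z : Int) (k : Nat) (hk : k < 8)
    (h : y % 256 = z % 256) : pvTb y k = pvTb z k := by
  have key : ∀ w : Int, pvTb w k = (w % 256).toNat.testBit k := by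
    intro w
    unfold pvTb
    by_cases hw : 0 ≤ w
    · have hm : (w % 256).toNat = w.toNat % 256 := by omega
      simp only [hw, if_true, hm]
      rw [show (256:Nat) = 2 ^ 8 from rfl, Nat.testBit_mod_two_pow]
      simp [hk]
    · have hmlt : (-w - 1).toNat % 256 < 256 := Nat.mod_lt _ (by norm_num)
      have hm : (w % 256).toNat = 255 - ((-w - 1).toNat % 256) := by omega
      simp only [hw, if_false, hm]
      rw [pvSub_testBit _ hmlt _ hk,
        show (256:Nat) = 2 ^ 8 from rfl, Nat.testBit_mod_two_pow]
      simp [hk]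
  rw [key, key, h]

theorem pvRead_congr (x y z : Int) (k : Nat) (hk : k < 8)
    (h : y % 256 = z % 256) :
    PySem.Int.band (PySem.Int.bxor x y) (2 ^ k)
      = PySem.Int.band (PySem.Int.bxor x z) (2 ^ k) := by
  rw [pvBand_two_pow, pvBand_two_pow, pvTb_bxor, pvTb_bxor,
    pvTb_congr y z k hk h]

theorem pvPow_shift (k : Nat) : ((2:Int) ^ (k+1)) >>> (1:Nat) = 2 ^ k := by
  have h : ((2:Int) ^ (k+1)) = Int.ofNat (2 ^ (k+1)) := by
    rw [Int.ofNat_eq_natCast]; push_cast; ring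
  rw [h]
  show Int.ofNat ((2 ^ (k+1)) >>> 1) = _
  rw [Nat.shiftRight_succ, Nat.shiftRight_zero, Nat.pow_succ,
    Nat.mul_div_cancel _ (by norm_num : 0 < 2), Int.ofNat_eq_natCast]
  push_cast; ring

theorem diffLoopA_step (fuel : Nat) (sl pd bp bo bq : Int) (h : bq ≠ 0) :
    diffLoopA (fuel+1) sl pd bp bo bq
      = diffLoopA fuel sl pd
          (PySem.Int.band (PySem.Int.bxor (PySem.Int.band (bp >>> (1:Nat)) pd) sl) bq)
          (PySem.Int.bor bo (PySem.Int.band (PySem.Int.bxor (bp >>> (1:Nat)) sl) bq))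
          (bq >>> (1:Nat)) := by
  rw [show diffLoopA (fuel+1) sl pd bp bo bq = if bq ≠ 0 then _ else bo from rfl, if_pos h]

theorem pvLoop_congr : ∀ (k : Nat), k < 8 → ∀ (sl t pd bp bo : Int),
    sl % 256 = t % 256 →
    diffLoopA (k+1) sl pd bp bo (2 ^ k) = diffLoopA (k+1) t pd bp bo (2 ^ k) := by
  intro k
  induction k with
  | zero =>
    intro _ sl t pd bp bo h
    have hread := pvRead_congr (bp >>> (1:Nat)) sl t 0 (by norm_num) h
    rw [pow_zero] at hread ⊢
    rw [diffLoopA_step _ _ _ _ _ _ one_ne_zero, diffLoopA_step _ _ _ _ _ _ one_ne_zero,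
      hread]
    rfl
  | succ k ih =>
    intro hk sl t pd bp bo h
    have hk8 : k + 1 < 8 := hk
    have hne : ((2:Int) ^ (k+1)) ≠ 0 := by positivity
    rw [diffLoopA_step _ _ _ _ _ _ hne, diffLoopA_step _ _ _ _ _ _ hne, pvPow_shift,
      pvRead_congr (bp >>> (1:Nat)) sl t (k+1) hk8 h,
      pvRead_congr (PySem.Int.band (bp >>> (1:Nat)) pd) sl t (k+1) hk8 h]
    exact ih (by omega) sl t pd _ _ h

-- the per-byte table: A's 8-step loop equals Gray encode / decode, for bytes
set_option maxHeartbeats 4000000 in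
set_option maxRecDepth 10000 in
theorem pvByteTable : ∀ n : Nat, n < 256 →
    diffLoopA 8 ↑n 0 0 0 128 = grayEnc ↑n ∧ diffLoopA 8 ↑n 255 0 0 128 = grayDec ↑n := by
  decide

theorem pvBand_255 (a : Int) : PySem.Int.band a 255 = a % 256 := by
  unfold PySem.Int.band
  by_cases ha : 0 ≤ a
  · have h255 : ((255:Int)).toNat = 2 ^ 8 - 1 := rfl
    simp only [ha, if_true, show (0:Int) ≤ 255 by norm_num, if_true, h255,
      Nat.and_two_pow_sub_one_eq_mod]
    omega
  · have h255 : ((255:Int)).toNat = 2 ^ 8 - 1 := rfl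
    simp only [ha, if_false, show (0:Int) ≤ 255 by norm_num, if_true, h255,
      Nat.and_comm, Nat.and_two_pow_sub_one_eq_mod]
    have : (-a - 1).toNat % 2 ^ 8 < 256 := Nat.mod_lt _ (by norm_num)
    omega

theorem pvByte (sl pd : Int) (hpd : pd = 0 ∨ pd = 255) :
    diffLoopA 8 sl pd 0 0 128 =
      (if pd = 0 then grayEnc else grayDec) (PySem.Int.band sl 255) := by
  have hmod : sl % 256 = (sl % 256) % 256 := by omega
  have hcongr := pvLoop_congr 7 (by norm_num) sl (sl % 256) pd 0 0 hmod
  norm_num at hcongr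
  have hr : 0 ≤ sl % 256 ∧ sl % 256 < 256 := by omega
  obtain ⟨n, hn, hlt⟩ : ∃ n : Nat, (↑n : Int) = sl % 256 ∧ n < 256 :=
    ⟨(sl % 256).toNat, by omega, by omega⟩
  have htbl := pvByteTable n hlt
  rcases hpd with h0 | h255
  · subst h0
    rw [hcongr, ← hn, htbl.1, pvBand_255, ← hn]
    simp
  · subst h255
    rw [hcongr, ← hn, htbl.2, pvBand_255, ← hn]
    norm_num

theorem pvFoldl_map (f : Int → Int) (bs : List Int) : ∀ acc : List Int,
    bs.foldl (fun bu sl => bu ++ [f sl]) acc = acc ++ bs.map f := by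
  induction bs with
  | nil => simp
  | cons x xs ih => intro acc; simp [List.foldl_cons, ih, List.append_assoc]

-- ===== VERDICT (by name: the statement is the Claim_ definition above) =====
theorem diff_h_spec : Claim_equal_diff_h := by
  intro bs revers _
  unfold Spec_diff_h diff_h diff_h_alt
  simp only [pvFoldl_map, List.nil_append]
  apply List.map_congr_left
  intro sl _
  by_cases hr : revers ≠ 0
  · simp only [if_pos hr]
    have h := pvByte sl 255 (Or.inr rfl)
    rw [if_neg (by norm_num : ¬ (255:Int) = 0)] at h
    exact h
  · simp only [if_neg hr]
    have h := pvByte sl 0 (Or.inl rfl)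
    rw [if_pos rfl] at h
    exact h
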